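-- pv_equiv track=rewrite | github.com/austral-prog/tp-7-rosarioassirio | loops_and_print.py | enumerate_backwards
-- ===== SOURCE A (Python) =====
-- def enumerate_backwards(list):
--     new_list = []
--     index = 0
--     for element in list:
--         if element:
--             new_list.append(f"{index}. {element[::-1]}")
--             index += 1
--     return new_list
-- ===== SOURCE B (Python) =====
-- def enumerate_backwards(list):
--     idx = sum(1 for e in list if e)
--     out = []
--     for e in reversed(list):
--         if e:
--             idx -= 1
--             out.append(f"{idx}. {e[::-1]}")
--     out.reverse()
--     return out
-- ===== Notes on version B (the rewrite author's own statement) =====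
-- stated objective: alternative
-- what changed: Instead of a forward scan with an ascending counter, B first counts the truthy elements, then traverses the list from the RIGHT with a DESCENDING counter, building the output back-to-front and reversing it once at the end.
import Mathlib
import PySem

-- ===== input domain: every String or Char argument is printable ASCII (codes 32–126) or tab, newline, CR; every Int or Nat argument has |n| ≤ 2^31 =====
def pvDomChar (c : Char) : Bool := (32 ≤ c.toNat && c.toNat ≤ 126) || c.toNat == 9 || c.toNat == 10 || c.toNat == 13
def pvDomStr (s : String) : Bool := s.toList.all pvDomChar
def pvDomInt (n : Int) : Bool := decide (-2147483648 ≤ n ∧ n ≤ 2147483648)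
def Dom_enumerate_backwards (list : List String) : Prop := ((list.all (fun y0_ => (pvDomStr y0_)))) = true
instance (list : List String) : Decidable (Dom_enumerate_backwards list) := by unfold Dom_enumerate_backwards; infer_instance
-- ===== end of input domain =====

-- B replaces A's forward scan with an ascending counter by: count the truthy elements,
-- traverse the list from the right with a descending counter, build the output
-- back-to-front and reverse it once at the end; return values are identical.

-- ===== PORT A =====
-- f"{index}. {element[::-1]}": element[::-1] is string reversal (PySem.Str.slice?_none_none_neg_one)
def pvFmt (i : Int) (e : String) : String :=
  PySem.Int.toStr i ++ ". " ++ String.ofList e.toList.reverse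

def enumerate_backwards (list : List String) : List String :=
  (list.foldl
    (fun (st : List String × Int) element =>
      if element ≠ "" then (st.1 ++ [pvFmt st.2 element], st.2 + 1) else st)
    ([], 0)).1

-- ===== PORT B =====
def enumerate_backwards_alt (list : List String) : List String :=
  -- idx = sum(1 for e in list if e)
  let idx0 : Int := list.foldl (fun n e => if e ≠ "" then n + 1 else n) 0
  -- backward traversal with a descending counter, appending
  let st := list.reverse.foldl
    (fun (st : Int × List String) e =>
      if e ≠ "" then (st.1 - 1, st.2 ++ [pvFmt (st.1 - 1) e]) else st)
    (idx0, [])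
  st.2.reverse

-- ===== PRECONDITION & SPEC =====
def Spec_enumerate_backwards (list : List String) (out : List String) : Prop := out = enumerate_backwards_alt list
instance (list : List String) (out : List String) : Decidable (Spec_enumerate_backwards list out) := by unfold Spec_enumerate_backwards; infer_instance

-- ===== CLAIM =====
def Claim_equal_enumerate_backwards : Prop := ∀ (list : List String), Dom_enumerate_backwards list → Spec_enumerate_backwards list (enumerate_backwards list)

-- ===== LEMMAS AND PROOFS =====
-- A's loop produces the filtered elements formatted with ascending indices.
lemma ebA_loop (xs : List String) (acc : List String) (i : Int) :
    (xs.foldl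
      (fun (st : List String × Int) element =>
        if element ≠ "" then (st.1 ++ [pvFmt st.2 element], st.2 + 1) else st)
      (acc, i)).1
    = acc ++ (PySem.List.enumerate (xs.filter (fun e => e ≠ "")) i).map (fun p => pvFmt p.1 p.2) := by
  induction xs generalizing acc i with
  | nil => simp [PySem.List.enumerate_nil]
  | cons e rest ih =>
    rw [List.foldl_cons]
    by_cases h : e = ""
    · rw [show (if e ≠ "" then ((acc, i).1 ++ [pvFmt (acc, i).2 e], (acc, i).2 + 1) else (acc, i)) = (acc, i) from if_neg (by simp [h])]
      rw [ih]
      simp [List.filter_cons, h]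
    · rw [show (if e ≠ "" then ((acc, i).1 ++ [pvFmt (acc, i).2 e], (acc, i).2 + 1) else (acc, i)) = (acc ++ [pvFmt i e], i + 1) from if_pos h]
      rw [ih]
      simp [List.filter_cons, h, PySem.List.enumerate_cons]

-- B's count equals the length of the filtered list.
lemma ebB_count (xs : List String) (n : Int) :
    xs.foldl (fun n e => if e ≠ "" then n + 1 else n) n
    = n + ((xs.filter (fun e => e ≠ "")).length : Int) := by
  induction xs generalizing n with
  | nil => simp
  | cons e rest ih =>
    rw [List.foldl_cons]
    by_cases h : e = ""
    · rw [show (if e ≠ "" then n + 1 else n) = n from if_neg (by simp [h])]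
      rw [ih]
      simp [List.filter_cons, h]
    · rw [show (if e ≠ "" then n + 1 else n) = n + 1 from if_pos h]
      rw [ih]
      simp [List.filter_cons, h]
      push_cast [List.length_cons]
      ring

-- B's backward loop assigns descending indices; its output is the reversed
-- enumeration of the reversed filtered list.
lemma ebB_loop (ys : List String) (idx : Int) (out : List String) :
    (ys.foldl
      (fun (st : Int × List String) e =>
        if e ≠ "" then (st.1 - 1, st.2 ++ [pvFmt (st.1 - 1) e]) else st)
      (idx, out)).2
    = out ++ ((PySem.List.enumerate ((ys.filter (fun e => e ≠ "")).reverse)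
        (idx - ((ys.filter (fun e => e ≠ "")).length : Int))).reverse.map (fun p => pvFmt p.1 p.2)) := by
  induction ys generalizing idx out with
  | nil => simp [PySem.List.enumerate_nil]
  | cons e rest ih =>
    rw [List.foldl_cons]
    by_cases h : e = ""
    · rw [show (if e ≠ "" then ((idx, out).1 - 1, (idx, out).2 ++ [pvFmt ((idx, out).1 - 1) e]) else (idx, out)) = (idx, out) from if_neg (by simp [h])]
      rw [ih]
      simp [List.filter_cons, h]
    · rw [show (if e ≠ "" then ((idx, out).1 - 1, (idx, out).2 ++ [pvFmt ((idx, out).1 - 1) e]) else (idx, out)) = (idx - 1, out ++ [pvFmt (idx - 1) e]) from if_pos h]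
      rw [ih]
      have hfc : (e :: rest).filter (fun e => decide (e ≠ "")) = e :: rest.filter (fun e => decide (e ≠ "")) := by
        simp [List.filter_cons, h]
      rw [hfc]
      set L := rest.filter (fun e => decide (e ≠ "")) with hL
      have hidx : idx - (((e :: L).length : Nat) : Int) = idx - 1 - (L.length : Int) := by
        push_cast [List.length_cons]
        ring
      rw [List.reverse_cons, PySem.List.enumerate_append, hidx]
      have hlen : (idx - 1 - (L.length : Int)) + (L.reverse.length : Int) = idx - 1 := by
        push_cast [List.length_reverse]
        ring
      rw [hlen]
      simp [PySem.List.enumerate_cons, PySem.List.enumerate_nil]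

-- ===== VERDICT =====
theorem enumerate_backwards_spec : Claim_equal_enumerate_backwards := by
  intro list _
  show _ = _
  rw [enumerate_backwards, enumerate_backwards_alt]
  rw [ebA_loop, ebB_count, ebB_loop]
  simp [List.filter_reverse]
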